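-- pv_equiv track=rewrite | github.com/WANGJINYU0711/PSAgent | scripts/build_telecom_mms_fixed_tree.py | make_instance_id
-- ===== SOURCE A (Python) =====
-- def make_instance_id(task_id: str) -> str:
--     normalized = task_id
--     for src, dst in {
--         "[": "",
--         "]": "",
--         "|": "__",
--         ":": "_",
--         " ": "_",
--     }.items():
--         normalized = normalized.replace(src, dst)
--     return f"telecom_mms_task_{normalized}"
-- ===== SOURCE B (Python) =====
-- def make_instance_id(task_id: str) -> str:
--     def sub(ch):
--         if ch == "[" or ch == "]":
--             return ""
--         if ch == "|":
--             return "__"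
--         if ch == ":" or ch == " ":
--             return "_"
--         return ch
--     return "telecom_mms_task_" + "".join(sub(ch) for ch in task_id)
-- ===== Notes on version B (the rewrite author's own statement) =====
-- stated objective: idiomatic
-- what changed: Replaces five sequential whole-string str.replace passes with a single pass over the characters that maps each character to its substitution and joins the pieces.
import Mathlib
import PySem

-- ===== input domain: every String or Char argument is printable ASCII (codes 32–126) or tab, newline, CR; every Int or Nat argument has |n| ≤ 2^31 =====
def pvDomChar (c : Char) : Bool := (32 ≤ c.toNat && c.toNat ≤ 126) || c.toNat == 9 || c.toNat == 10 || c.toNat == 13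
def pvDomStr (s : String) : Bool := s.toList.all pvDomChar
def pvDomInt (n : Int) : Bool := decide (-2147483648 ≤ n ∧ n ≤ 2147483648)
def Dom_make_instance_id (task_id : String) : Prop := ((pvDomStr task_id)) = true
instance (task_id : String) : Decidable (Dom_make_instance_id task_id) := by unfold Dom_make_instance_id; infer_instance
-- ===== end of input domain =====

-- B replaces A's five sequential whole-string replace passes with one pass that maps
-- each character to its substitution (objective: idiomatic single pass).

-- ===== PORT A =====
-- the literal dict of A, as an association list iterated in insertion order
def pvRules : List (String × String) :=
  [("[", ""), ("]", ""), ("|", "__"), (":", "_"), (" ", "_")]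

def make_instance_id (task_id : String) : String :=
  let normalized := pvRules.foldl (fun n p => PySem.Str.replace n p.1 p.2) task_id
  "telecom_mms_task_" ++ normalized

-- ===== PORT B =====
-- B's helper sub(ch): the early-return chain, verbatim
def pvSub (ch : Char) : List Char :=
  if ch = '[' ∨ ch = ']' then []
  else if ch = '|' then ['_', '_']
  else if ch = ':' ∨ ch = ' ' then ['_']
  else [ch]

def make_instance_id_alt (task_id : String) : String :=
  "telecom_mms_task_" ++ String.ofList ((task_id.toList.map pvSub).flatten)

-- ===== PRECONDITION & SPEC =====
def Spec_make_instance_id (task_id : String) (out : String) : Prop := out = make_instance_id_alt task_id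
instance (task_id : String) (out : String) : Decidable (Spec_make_instance_id task_id out) := by unfold Spec_make_instance_id; infer_instance

-- ===== CLAIM (what is proved, stated in full; the proofs are below) =====
def Claim_equal_make_instance_id : Prop := ∀ (task_id : String), Dom_make_instance_id task_id → Spec_make_instance_id task_id (make_instance_id task_id)

-- ===== LEMMAS AND PROOFS =====

-- replacing a single-character pattern is a per-character substitution
theorem replace_go_single (c : Char) (ds : List Char) :
    ∀ (fuel : Nat) (l acc : List Char), l.length ≤ fuel →
      PySem.Chars.replace.go [c] ds fuel l acc
        = acc.reverse ++ l.flatMap (fun x => if x = c then ds else [x]) := by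
  intro fuel
  induction fuel with
  | zero =>
    intro l acc h
    have : l = [] := List.length_eq_zero_iff.mp (Nat.le_zero.mp h)
    subst this
    simp [PySem.Chars.replace.go]
  | succ n ih =>
    intro l acc h
    cases l with
    | nil => simp [PySem.Chars.replace.go]
    | cons x t =>
      simp only [PySem.Chars.replace.go]
      by_cases hx : x = c
      · subst hx
        have hp : List.isPrefixOf [x] (x :: t) = true := by
          simp [List.isPrefixOf]
        rw [if_pos hp]
        rw [show List.drop [x].length (x :: t) = t from rfl]
        simp only [List.length_cons] at h
        rw [ih t _ (by omega)]
        simp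
      · have hp : List.isPrefixOf [c] (x :: t) = false := by
          simp [List.isPrefixOf]
          exact fun hc => absurd hc.symm hx
        rw [if_neg (by simp [hp])]
        simp only [List.length_cons] at h
        rw [ih t _ (by omega)]
        simp [hx]

theorem replace_single (cs : List Char) (c : Char) (ds : List Char) :
    PySem.Chars.replace cs [c] ds = cs.flatMap (fun x => if x = c then ds else [x]) := by
  rw [PySem.Chars.replace]
  simp only [List.isEmpty_cons, if_false, Bool.false_eq_true]
  exact replace_go_single c ds cs.length cs [] (le_refl _)

-- the composed five substitutions agree with pvSub on every character
theorem comp_eq_pvSub (x : Char) :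
    List.flatMap
      (fun x =>
        List.flatMap
          (fun x =>
            List.flatMap
              (fun x =>
                List.flatMap (fun x => if x = ' ' then ['_'] else [x]) (if x = ':' then ['_'] else [x]))
              (if x = '|' then ['_', '_'] else [x]))
          (if x = ']' then [] else [x]))
      (if x = '[' then [] else [x]) = pvSub x := by
  by_cases h1 : x = '[' <;> by_cases h2 : x = ']' <;> by_cases h3 : x = '|' <;>
    by_cases h4 : x = ':' <;> by_cases h5 : x = ' ' <;>
    simp_all [pvSub]

-- ===== VERDICT (by name: the statement is the Claim_ definition above) =====
theorem make_instance_id_spec : Claim_equal_make_instance_id := by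
  intro task_id _
  unfold Spec_make_instance_id make_instance_id make_instance_id_alt pvRules
  apply String.ext  -- equality via toList
  simp only [List.foldl, String.toList_append, PySem.Str.toList_replace]
  congr 1
  have h1 : ("[" : String).toList = ['['] := rfl
  have h2 : ("]" : String).toList = [']'] := rfl
  have h3 : ("|" : String).toList = ['|'] := rfl
  have h4 : (":" : String).toList = [':'] := rfl
  have h5 : (" " : String).toList = [' '] := rfl
  have he : ("" : String).toList = [] := rfl
  have hu : ("__" : String).toList = ['_','_'] := rfl
  have hs : ("_" : String).toList = ['_'] := rfl
  rw [h1, h2, h3, h4, h5, he, hu, hs]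
  rw [replace_single, replace_single, replace_single, replace_single, replace_single]
  simp only [List.flatMap_assoc, String.toList_ofList, List.flatten_eq_flatMap, List.flatMap_map]
  exact List.flatMap_congr (fun x _ => comp_eq_pvSub x)
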